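-- pv_equiv track=rewrite | github.com/tn-pisama/mao-testing-research | backend/app/detection/tool_provision.py | _infer_needed_tools
-- ===== SOURCE A (Python) =====
-- from typing import Optional, List, Set, Dict, Any
--
-- def _infer_needed_tools(task: str) -> Set[str]:
--     """Infer what tools might be needed based on task description."""
--     needed = set()
--     task_lower = task.lower()
--
--     # Web search indicators
--     if any(w in task_lower for w in ["search", "find online", "look up", "google", "current", "latest", "today's"]):
--         needed.add("web_search")
--
--     # File operation indicators
--     if any(w in task_lower for w in ["read file", "write file", "save to", "load from", "file"]):
--         needed.add("file_ops")
--
--     # Code execution indicators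
--     if any(w in task_lower for w in ["run code", "execute", "python", "script", "calculate"]):
--         needed.add("code_exec")
--
--     # API indicators
--     if any(w in task_lower for w in ["api", "fetch data", "http", "endpoint", "request"]):
--         needed.add("api_calls")
--
--     # Database indicators
--     if any(w in task_lower for w in ["database", "sql", "query", "table"]):
--         needed.add("database")
--
--     # Email indicators
--     if any(w in task_lower for w in ["send email", "email", "mail to"]):
--         needed.add("email")
--
--     # Calendar indicators
--     if any(w in task_lower for w in ["schedule", "calendar", "meeting", "appointment"]):
--         needed.add("calendar")
--
--     return needed
-- ===== SOURCE B (Python) =====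
-- _RULES = [
--     ("web_search", ["search", "find online", "look up", "google", "current", "latest", "today's"]),
--     ("file_ops", ["read file", "write file", "save to", "load from", "file"]),
--     ("code_exec", ["run code", "execute", "python", "script", "calculate"]),
--     ("api_calls", ["api", "fetch data", "http", "endpoint", "request"]),
--     ("database", ["database", "sql", "query", "table"]),
--     ("email", ["send email", "email", "mail to"]),
--     ("calendar", ["schedule", "calendar", "meeting", "appointment"]),
-- ]
--
-- def _infer_needed_tools(task: str):
--     """Infer what tools might be needed based on task description."""
--     s = task.lower()
--     # Naive multi-pattern scan: walk every starting position of the string once,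
--     # prefix-matching every keyword there, and collect the matched keywords.
--     hits = set()
--     for i in range(len(s) + 1):
--         for _tag, kws in _RULES:
--             for w in kws:
--                 if s.startswith(w, i):
--                     hits.add(w)
--     # Map matched keywords back to tool tags.
--     return {tag for tag, kws in _RULES if any(w in hits for w in kws)}
-- ===== Notes on version B (the rewrite author's own statement) =====
-- stated objective: alternative
-- what changed: Instead of running a separate substring test for each keyword per tag, B does one left-to-right scan over the string's starting positions, prefix-matching all keywords of a constant rules table at each position into a set of matched keywords, and then emits the tags whose keyword list intersects that set.
import Mathlib
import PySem

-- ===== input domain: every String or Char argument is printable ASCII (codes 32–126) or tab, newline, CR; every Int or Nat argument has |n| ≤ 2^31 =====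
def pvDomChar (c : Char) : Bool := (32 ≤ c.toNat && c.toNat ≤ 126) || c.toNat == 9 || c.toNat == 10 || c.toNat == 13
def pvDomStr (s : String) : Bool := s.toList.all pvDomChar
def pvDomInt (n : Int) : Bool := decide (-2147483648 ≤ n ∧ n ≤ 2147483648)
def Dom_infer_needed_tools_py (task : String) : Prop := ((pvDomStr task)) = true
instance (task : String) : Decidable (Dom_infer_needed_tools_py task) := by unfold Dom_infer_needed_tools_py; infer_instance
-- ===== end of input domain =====

-- B replaces A's per-keyword substring tests by one scan over the string's
-- starting positions that prefix-matches all keywords of a constant rules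
-- table, then maps matched keywords back to tags (alternative algorithm).

-- ===== PORT A =====
def infer_needed_tools_py (task : String) : List String :=
  let needed : PySem.Set String := PySem.Set.empty
  let task_lower := PySem.Str.lower task
  let needed := if ["search", "find online", "look up", "google", "current", "latest", "today's"].any
      (fun w => PySem.Str.isIn w task_lower) then PySem.Set.add needed "web_search" else needed
  let needed := if ["read file", "write file", "save to", "load from", "file"].any
      (fun w => PySem.Str.isIn w task_lower) then PySem.Set.add needed "file_ops" else needed
  let needed := if ["run code", "execute", "python", "script", "calculate"].any
      (fun w => PySem.Str.isIn w task_lower) then PySem.Set.add needed "code_exec" else needed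
  let needed := if ["api", "fetch data", "http", "endpoint", "request"].any
      (fun w => PySem.Str.isIn w task_lower) then PySem.Set.add needed "api_calls" else needed
  let needed := if ["database", "sql", "query", "table"].any
      (fun w => PySem.Str.isIn w task_lower) then PySem.Set.add needed "database" else needed
  let needed := if ["send email", "email", "mail to"].any
      (fun w => PySem.Str.isIn w task_lower) then PySem.Set.add needed "email" else needed
  let needed := if ["schedule", "calendar", "meeting", "appointment"].any
      (fun w => PySem.Str.isIn w task_lower) then PySem.Set.add needed "calendar" else needed
  needed

-- ===== PORT B =====
def pvRules : List (String × List String) :=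
  [("web_search", ["search", "find online", "look up", "google", "current", "latest", "today's"]),
   ("file_ops", ["read file", "write file", "save to", "load from", "file"]),
   ("code_exec", ["run code", "execute", "python", "script", "calculate"]),
   ("api_calls", ["api", "fetch data", "http", "endpoint", "request"]),
   ("database", ["database", "sql", "query", "table"]),
   ("email", ["send email", "email", "mail to"]),
   ("calendar", ["schedule", "calendar", "meeting", "appointment"])]

-- the positional scan of Source B: for i in range(len(s)+1): for each rule, for each
-- keyword w: if s.startswith(w, i): hits.add(w).
-- 's.startswith(w, i)' with 0 ≤ i ≤ len(s) is exactly a prefix match on s[i:]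
-- (PySem.Chars.startswith on s.toList.drop i.toNat — exact on that range).
def pvHits (s : String) : PySem.Set String :=
  (PySem.List.pyRange 0 (PySem.Str.len s + 1) 1).foldl
    (fun h i => pvRules.foldl
      (fun h r => r.2.foldl
        (fun h w =>
          if PySem.Chars.startswith (s.toList.drop i.toNat) w.toList then PySem.Set.add h w else h)
        h)
      h)
    PySem.Set.empty

def infer_needed_tools_py_alt (task : String) : List String :=
  let s := PySem.Str.lower task
  let hits := pvHits s
  pvRules.foldl
    (fun acc r => if r.2.any (fun w => PySem.Set.contains hits w) then PySem.Set.add acc r.1 else acc)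
    PySem.Set.empty

-- ===== PRECONDITION & SPEC =====
def Spec_infer_needed_tools_py (task : String) (out : List String) : Prop := out = infer_needed_tools_py_alt task
instance (task : String) (out : List String) : Decidable (Spec_infer_needed_tools_py task out) := by unfold Spec_infer_needed_tools_py; infer_instance

-- ===== CLAIM (what is proved, stated in full; the proofs are below) =====
def Claim_equal_infer_needed_tools_py : Prop := ∀ (task : String), Dom_infer_needed_tools_py task → Spec_infer_needed_tools_py task (infer_needed_tools_py task)

-- ===== LEMMAS AND PROOFS =====

-- membership through a foldl whose step adds elements characterised by P
theorem pv_mem_foldl {β : Type} (l : List β) (f : PySem.Set String → β → PySem.Set String)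
    (P : β → String → Prop)
    (hf : ∀ h b x, x ∈ f h b ↔ x ∈ h ∨ P b x) (h : PySem.Set String) (x : String) :
    x ∈ l.foldl f h ↔ x ∈ h ∨ ∃ b ∈ l, P b x := by
  induction l generalizing h with
  | nil => simp
  | cons b t ih =>
    simp only [List.foldl_cons, ih, hf, List.mem_cons]
    constructor
    · rintro ((h1 | h1) | ⟨c, hc, hp⟩)
      · exact Or.inl h1
      · exact Or.inr ⟨b, Or.inl rfl, h1⟩
      · exact Or.inr ⟨c, Or.inr hc, hp⟩
    · rintro (h1 | ⟨c, (rfl | hc), hp⟩)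
      · exact Or.inl (Or.inl h1)
      · exact Or.inl (Or.inr hp)
      · exact Or.inr ⟨c, hc, hp⟩

theorem pv_mem_pvHits (s x : String) :
    x ∈ pvHits s ↔ ∃ i ∈ PySem.List.pyRange 0 (PySem.Str.len s + 1) 1,
      ∃ r ∈ pvRules, x ∈ r.2 ∧ PySem.Chars.startswith (s.toList.drop i.toNat) x.toList = true := by
  unfold pvHits
  rw [pv_mem_foldl _ _ (fun i x => ∃ r ∈ pvRules, x ∈ r.2 ∧
        PySem.Chars.startswith (s.toList.drop i.toNat) x.toList = true)]
  · simp [PySem.Set.empty]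
  · intro h i x
    rw [pv_mem_foldl _ _ (fun r x => x ∈ r.2 ∧
          PySem.Chars.startswith (s.toList.drop i.toNat) x.toList = true)]
    intro h r x
    rw [pv_mem_foldl _ _ (fun w x => x = w ∧
          PySem.Chars.startswith (s.toList.drop i.toNat) w.toList = true)]
    · constructor
      · rintro (h1 | ⟨w, hw, rfl, hsw⟩)
        · exact Or.inl h1
        · exact Or.inr ⟨hw, hsw⟩
      · rintro (h1 | ⟨hw, hsw⟩)
        · exact Or.inl h1
        · exact Or.inr ⟨x, hw, rfl, hsw⟩
    · intro h w x
      split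
      · next hc => simp [PySem.Set.mem_add, hc]
      · next hc =>
        simp only [iff_self_or]
        rintro ⟨rfl, hx⟩
        exact absurd hx hc

-- a prefix occurrence at any position has one at a position ≤ length
theorem pv_prefix_bounded {p l : List Char} (h : ∃ j, p <+: l.drop j) :
    ∃ j ≤ l.length, p <+: l.drop j := by
  obtain ⟨j, hj⟩ := h
  by_cases hle : j ≤ l.length
  · exact ⟨j, hle, hj⟩
  · refine ⟨l.length, le_rfl, ?_⟩
    rw [List.drop_eq_nil_of_le (le_of_lt (lt_of_not_ge hle))] at hj
    simp only [List.prefix_nil] at hj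
    simp [hj, List.drop_length]

theorem pv_mem_pvHits_iff_isIn (s x : String) (hx : ∃ r ∈ pvRules, x ∈ r.2) :
    x ∈ pvHits s ↔ PySem.Str.isIn x s = true := by
  rw [pv_mem_pvHits]
  rw [PySem.Str.isIn_iff_infix, ← PySem.Chars.isIn_iff_infix,
      ← PySem.Chars.exists_prefix_drop_iff_isIn]
  constructor
  · rintro ⟨i, hi, r, hr, hxr, hsw⟩
    exact ⟨i.toNat, (PySem.Chars.startswith_iff _ _).mp hsw⟩
  · rintro ⟨j, hj⟩
    obtain ⟨j', hj', hp⟩ := pv_prefix_bounded ⟨j, hj⟩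
    refine ⟨(j' : Int), ?_, hx.imp (fun r hr => ⟨hr.1, hr.2, ?_⟩)⟩
    · rw [PySem.List.mem_pyRange_one]
      constructor
      · exact Int.natCast_nonneg j'
      · have : (PySem.Str.len s) = (s.toList.length : Int) := by
          simp [PySem.Str.len]
        omega
    · rw [PySem.Chars.startswith_iff]
      simpa using hp

-- ===== VERDICT (by name: the statement is the Claim_ definition above) =====
theorem infer_needed_tools_py_spec : Claim_equal_infer_needed_tools_py := by
  intro task _
  show infer_needed_tools_py task = infer_needed_tools_py_alt task
  have hA : infer_needed_tools_py task =
      pvRules.foldl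
        (fun acc r => if r.2.any (fun w => PySem.Str.isIn w (PySem.Str.lower task)) then PySem.Set.add acc r.1 else acc)
        PySem.Set.empty := by
    simp only [pvRules, List.foldl]
    rfl
  rw [hA]
  unfold infer_needed_tools_py_alt
  apply PySem.List.foldl_congr_mem
  intro acc r hr
  have hcond : r.2.any (fun w => PySem.Str.isIn w (PySem.Str.lower task)) =
      r.2.any (fun w => PySem.Set.contains (pvHits (PySem.Str.lower task)) w) := by
    rw [Bool.eq_iff_iff]
    simp only [List.any_eq_true]
    constructor
    · rintro ⟨w, hw, hin⟩
      refine ⟨w, hw, ?_⟩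
      rw [PySem.Set.contains_iff, pv_mem_pvHits_iff_isIn _ _ ⟨r, hr, hw⟩]
      exact hin
    · rintro ⟨w, hw, hin⟩
      refine ⟨w, hw, ?_⟩
      rw [PySem.Set.contains_iff, pv_mem_pvHits_iff_isIn _ _ ⟨r, hr, hw⟩] at hin
      exact hin
  rw [hcond]
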